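-- pv_equiv track=rewrite | github.com/AdrianKhalatbari/Fun_With_Python | PronicNumbers.py | ponicNumber
-- ===== SOURCE A (Python) =====
-- def ponicNumber(searchedNumber):
--     flag = False
--     output = 0
--     ponicNumberList = []
--     for i in range(searchedNumber):
--         output = (i + 1) * (i + 2)
--         if output < searchedNumber:
--             ponicNumberList.append(output)
--         elif output == searchedNumber:
--             flag = True
--             ponicNumberList.append(output)
--         else:
--             return ponicNumberList, flag
-- ===== SOURCE B (Python) =====
-- def ponicNumber(searchedNumber):
--     # A returns None (falls off the loop) for non-positive input; reproduce that.
--     if searchedNumber <= 0: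
--         return None
--     # binary search for the largest k with k*(k+1) <= searchedNumber
--     lo, hi = 0, searchedNumber
--     while lo < hi:
--         mid = (lo + hi + 1) // 2
--         if mid * (mid + 1) <= searchedNumber:
--             lo = mid
--         else:
--             hi = mid - 1
--     return [k * (k + 1) for k in range(1, lo + 1)], lo * (lo + 1) == searchedNumber
-- ===== Notes on version B (the rewrite author's own statement) =====
-- stated objective: alternative
-- what changed: Replaces A's linear scan with early return by a binary search for the largest k with k*(k+1) <= N plus a comprehension that builds the pronic list directly; the non-positive case (where A's loop body never runs and A returns None) is an explicit guard.
import Mathlib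
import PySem

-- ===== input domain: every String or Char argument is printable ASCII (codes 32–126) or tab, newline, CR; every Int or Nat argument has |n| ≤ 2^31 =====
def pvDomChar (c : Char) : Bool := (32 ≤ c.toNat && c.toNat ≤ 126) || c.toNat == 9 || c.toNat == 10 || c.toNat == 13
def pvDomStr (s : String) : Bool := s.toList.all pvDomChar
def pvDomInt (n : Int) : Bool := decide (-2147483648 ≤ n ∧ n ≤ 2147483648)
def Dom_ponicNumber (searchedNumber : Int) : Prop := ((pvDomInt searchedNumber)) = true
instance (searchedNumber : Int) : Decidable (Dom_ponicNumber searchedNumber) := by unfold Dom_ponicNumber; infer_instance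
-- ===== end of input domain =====

-- B replaces A's linear scan-and-compare loop with a binary search for the largest k with
-- k*(k+1) ≤ N plus a direct comprehension over the pronics (alternative algorithm, same cost class).
-- ===== PORT A =====
-- loop body of A: iterate over the remaining range values with early return; falling
-- off the end of the range (Python's implicit 'return None') is the [] case.
def ponicNumberGo (searchedNumber : Int) (flag : Bool) (lst : List Int) :
    List Int → Option (List Int × Bool)
  | [] => none
  | i :: rest =>
    let output := (i + 1) * (i + 2)
    if output < searchedNumber then
      ponicNumberGo searchedNumber flag (lst ++ [output]) rest
    else if output = searchedNumber then
      ponicNumberGo searchedNumber true (lst ++ [output]) rest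
    else
      some (lst, flag)

def ponicNumber (searchedNumber : Int) : Option (List Int × Bool) :=
  ponicNumberGo searchedNumber false [] (PySem.List.pyRange 0 searchedNumber 1)

-- ===== PORT B =====
-- B's while loop: binary search for the largest k with k*(k+1) <= searchedNumber.
-- fuel = (hi - lo) + 1 bounds the number of iterations (the gap shrinks every step);
-- it only makes the recursion structural, the loop always stops at lo = hi first.
def ponicFindMGo (searchedNumber : Int) : Nat → Int → Int → Int
  | 0, lo, _ => lo
  | f + 1, lo, hi =>
    if lo < hi then
      let mid := PySem.Int.floordiv (lo + hi + 1) 2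
      if mid * (mid + 1) ≤ searchedNumber then ponicFindMGo searchedNumber f mid hi
      else ponicFindMGo searchedNumber f lo (mid - 1)
    else lo

def ponicFindM (searchedNumber lo hi : Int) : Int :=
  ponicFindMGo searchedNumber ((hi - lo).toNat + 1) lo hi

def ponicNumber_alt (searchedNumber : Int) : Option (List Int × Bool) :=
  if searchedNumber ≤ 0 then none
  else
    let lo := ponicFindM searchedNumber 0 searchedNumber
    some ((PySem.List.pyRange 1 (lo + 1) 1).map (fun k => k * (k + 1)),
          decide (lo * (lo + 1) = searchedNumber))

-- ===== PRECONDITION & SPEC =====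
def Spec_ponicNumber (searchedNumber : Int) (out : Option (List Int × Bool)) : Prop := out = ponicNumber_alt searchedNumber
instance (searchedNumber : Int) (out : Option (List Int × Bool)) : Decidable (Spec_ponicNumber searchedNumber out) := by unfold Spec_ponicNumber; infer_instance

-- ===== CLAIM (what is proved, stated in full; the proofs are below) =====
def Claim_equal_ponicNumber : Prop := ∀ (searchedNumber : Int), Dom_ponicNumber searchedNumber → Spec_ponicNumber searchedNumber (ponicNumber searchedNumber)

-- ===== LEMMAS AND PROOFS =====

-- lemma: the binary search returns the largest k with k*(k+1) ≤ n, given a valid bracket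
theorem ponicFindMGo_spec (n : Int) : ∀ (f : Nat) (lo hi : Int), (hi - lo).toNat < f →
    lo ≤ hi → lo * (lo + 1) ≤ n → n < (hi + 1) * (hi + 2) →
    lo ≤ ponicFindMGo n f lo hi ∧
    (ponicFindMGo n f lo hi) * (ponicFindMGo n f lo hi + 1) ≤ n ∧
    n < (ponicFindMGo n f lo hi + 1) * (ponicFindMGo n f lo hi + 2) := by
  intro f
  induction f with
  | zero => intro lo hi hd; omega
  | succ d ih =>
    intro lo hi hd hle h2 h3
    by_cases hlt : lo < hi
    · rw [ponicFindMGo]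
      simp only [hlt, if_true]
      have hfd : PySem.Int.floordiv (lo + hi + 1) 2 = (lo + hi + 1) / 2 :=
        PySem.Int.floordiv_eq_ediv_of_pos (by omega)
      simp only [hfd]
      set mid := (lo + hi + 1) / 2 with hmid
      have hb1 : lo < mid := by omega
      have hb2 : mid ≤ hi := by omega
      by_cases hc : mid * (mid + 1) ≤ n
      · simp only [hc, if_true]
        have := ih mid hi (by omega) (by omega) hc h3
        exact ⟨by omega, this.2⟩
      · simp only [hc, if_false]
        have hlt2 : n < (mid - 1 + 1) * (mid - 1 + 2) := by
          have : n < mid * (mid + 1) := by omega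
          nlinarith
        exact ih lo (mid - 1) (by omega) (by omega) h2 hlt2
    · rw [ponicFindMGo]
      simp [hlt]
      have heq : lo = hi := by omega
      subst heq
      exact ⟨h2, h3⟩

theorem ponicFindM_spec (n lo hi : Int) (hle : lo ≤ hi) (h2 : lo * (lo + 1) ≤ n)
    (h3 : n < (hi + 1) * (hi + 2)) :
    lo ≤ ponicFindM n lo hi ∧
    (ponicFindM n lo hi) * (ponicFindM n lo hi + 1) ≤ n ∧
    n < (ponicFindM n lo hi + 1) * (ponicFindM n lo hi + 2) :=
  ponicFindMGo_spec n ((hi - lo).toNat + 1) lo hi (by omega) hle h2 h3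

-- lemma: shift the index of the mapped range by one
theorem map_range_shift : ∀ (d : Nat) (a b : Int), (b - a).toNat ≤ d →
    (PySem.List.pyRange a b 1).map (fun i => (i + 1) * (i + 2)) =
    (PySem.List.pyRange (a + 1) (b + 1) 1).map (fun k => k * (k + 1)) := by
  intro d
  induction d with
  | zero =>
    intro a b h
    rw [PySem.List.pyRange_one_eq_nil (by omega), PySem.List.pyRange_one_eq_nil (by omega)]
    simp
  | succ d ih =>
    intro a b h
    by_cases hab : a < b
    · rw [PySem.List.pyRange_one_cons hab, PySem.List.pyRange_one_cons (by omega : a + 1 < b + 1)]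
      simp only [List.map_cons]
      rw [ih (a + 1) b (by omega)]
      congr 1
      ring
    · rw [PySem.List.pyRange_one_eq_nil (by omega), PySem.List.pyRange_one_eq_nil (by omega)]
      simp

-- main loop lemma for A: starting at index j ≤ m, with m the largest k with k*(k+1) ≤ n,
-- the loop appends (i+1)*(i+2) for i = j .. m-1 and exits at i = m.
theorem ponicNumberGo_spec (n m : Int) (hm0 : 0 ≤ m) (hm1 : m * (m + 1) ≤ n)
    (hm2 : n < (m + 1) * (m + 2)) (hn : 1 ≤ n) :
    ∀ (d : Nat) (j : Int) (flag : Bool) (lst : List Int), 0 ≤ j → j ≤ m → (m - j).toNat ≤ d →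
    ponicNumberGo n flag lst (PySem.List.pyRange j n 1) =
      some (lst ++ (PySem.List.pyRange j m 1).map (fun i => (i + 1) * (i + 2)),
            flag || (decide (m * (m + 1) = n) && decide (j < m))) := by
  have hmn : m < n := by nlinarith
  intro d
  induction d with
  | zero =>
    intro j flag lst hj0 hjm hd
    have heq : j = m := by omega
    subst heq
    rw [PySem.List.pyRange_one_cons (by omega : j < n), ponicNumberGo]
    simp only [show ¬ (j + 1) * (j + 2) < n by omega, if_false,
      show ¬ (j + 1) * (j + 2) = n by omega]
    rw [PySem.List.pyRange_one_eq_nil (by omega)]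
    simp
  | succ d ih =>
    intro j flag lst hj0 hjm hd
    by_cases hjm' : j < m
    · have hout : (j + 1) * (j + 2) ≤ n := by nlinarith
      rw [PySem.List.pyRange_one_cons (by omega : j < n), ponicNumberGo]
      by_cases hlt : (j + 1) * (j + 2) < n
      · simp only [hlt, if_true]
        rw [ih (j + 1) flag (lst ++ [(j + 1) * (j + 2)]) (by omega) (by omega) (by omega)]
        rw [PySem.List.pyRange_one_cons hjm']
        simp only [List.map_cons, List.append_assoc, List.singleton_append]
        have hflag : (decide (m * (m + 1) = n) && decide (j + 1 < m)) =
            (decide (m * (m + 1) = n) && decide (j < m)) := by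
          by_cases hc : m * (m + 1) = n
          · have : j + 1 < m := by
              rcases lt_or_eq_of_le (by omega : j + 1 ≤ m) with h | h
              · exact h
              · exfalso
                have hr : (j + 1) * (j + 1 + 1) = (j + 1) * (j + 2) := by ring
                rw [← h] at hc
                omega
            simp [hc, this, hjm']
          · simp [hc]
        rw [hflag]
      · have heqn : (j + 1) * (j + 2) = n := by omega
        rw [if_neg hlt, if_pos heqn]
        rw [ih (j + 1) true (lst ++ [(j + 1) * (j + 2)]) (by omega) (by omega) (by omega)]
        rw [PySem.List.pyRange_one_cons hjm']
        simp only [List.map_cons, List.append_assoc, List.singleton_append, Bool.true_or]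
        have hj1 : j + 1 = m := by
          rcases lt_or_eq_of_le (by omega : j + 1 ≤ m) with h | h
          · exfalso; nlinarith
          · exact h
        have hc : m * (m + 1) = n := by rw [← hj1]; linear_combination heqn
        simp [hc, hjm']
    · have heq : j = m := by omega
      subst heq
      rw [PySem.List.pyRange_one_cons (by omega : j < n), ponicNumberGo]
      simp only [show ¬ (j + 1) * (j + 2) < n by omega, if_false,
        show ¬ (j + 1) * (j + 2) = n by omega]
      rw [PySem.List.pyRange_one_eq_nil (by omega)]
      simp

-- ===== VERDICT (by name: the statement is the Claim_ definition above) =====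
theorem ponicNumber_spec : Claim_equal_ponicNumber := by
  intro n _
  unfold Spec_ponicNumber ponicNumber ponicNumber_alt
  by_cases hn : n ≤ 0
  · rw [PySem.List.pyRange_one_eq_nil (by omega)]
    simp [hn, ponicNumberGo]
  · simp only [hn, if_false]
    have hn1 : 1 ≤ n := by omega
    obtain ⟨hge, h1, h2⟩ := ponicFindM_spec n 0 n (by omega) (by omega) (by nlinarith)
    set m := ponicFindM n 0 n with hm
    rw [ponicNumberGo_spec n m hge h1 h2 hn1 (m - 0).toNat 0 false [] (by omega) hge (by omega)]
    rw [map_range_shift (m - 0).toNat 0 m (by omega)]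
    simp only [List.nil_append, Bool.false_or, zero_add]
    by_cases hc : m * (m + 1) = n
    · have : 0 < m := by
        by_contra h
        have hm00 : m = 0 := by omega
        rw [hm00] at hc
        norm_num at hc
        omega
      simp [hc, this]
    · simp [hc]
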